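-- pv_equiv track=rewrite | github.com/f4rceful/Genny | test_run.py | _group_files
-- ===== SOURCE A (Python) =====
-- def _group_files(files: set[str]) -> dict[str, list[str]]:
--     groups: dict[str, list[str]] = {"docs": [], "src": [], "tests": [], "other": []}
--     for f in sorted(files):
--         if f.startswith("docs/"):
--             groups["docs"].append(f)
--         elif f.startswith("src/"):
--             groups["src"].append(f)
--         elif f.startswith("tests/"):
--             groups["tests"].append(f)
--         elif not f.startswith("."):
--             groups["other"].append(f)
--     return groups
-- ===== SOURCE B (Python) =====
-- _CATEGORIES = (("docs/", "docs"), ("src/", "src"), ("tests/", "tests"))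
--
--
-- def _category(f: str):
--     for prefix, key in _CATEGORIES:
--         if f.startswith(prefix):
--             return key
--     return None if f.startswith(".") else "other"
--
--
-- def _group_files(files: set[str]) -> dict[str, list[str]]:
--     return {key: sorted(f for f in files if _category(f) == key)
--             for key in ("docs", "src", "tests", "other")}
-- ===== Notes on version B (the rewrite author's own statement) =====
-- stated objective: alternative
-- what changed: A makes one sorted pass with an elif chain appending into a mutable dict of buckets; B has no classification loop at all: a table-driven first-match classifier assigns each name a category, and a dict comprehension builds each of the four entries by an independent filter-then-sort pass over the raw set.
import Mathlib
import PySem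

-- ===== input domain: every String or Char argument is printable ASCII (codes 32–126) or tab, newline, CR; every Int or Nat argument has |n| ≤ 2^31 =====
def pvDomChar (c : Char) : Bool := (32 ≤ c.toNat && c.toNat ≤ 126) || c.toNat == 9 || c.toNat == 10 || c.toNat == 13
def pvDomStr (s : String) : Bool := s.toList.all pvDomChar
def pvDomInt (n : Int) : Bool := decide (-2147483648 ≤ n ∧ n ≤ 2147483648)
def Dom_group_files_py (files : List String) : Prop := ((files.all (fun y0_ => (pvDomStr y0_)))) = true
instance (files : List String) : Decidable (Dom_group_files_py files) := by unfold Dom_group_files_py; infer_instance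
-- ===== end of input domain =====

-- B replaces A's single sorted elif-chain pass over a mutable dict by a table-driven
-- classifier and four independent filter-then-sort passes; alternative decomposition, same cost.

-- ===== PORT A =====
-- for f in sorted(files): append f to the dict bucket chosen by the elif chain
def group_files_py (files : List String) : List (String × List String) :=
  let init : PySem.Dict String (List String) :=
    PySem.Dict.ofList [("docs", []), ("src", []), ("tests", []), ("other", [])]
  let groups :=
    (PySem.List.sorted files (fun x => x) false).foldl (fun groups f =>
      if PySem.Str.startswith f "docs/" then groups.modify "docs" [] (fun l => l ++ [f])
      else if PySem.Str.startswith f "src/" then groups.modify "src" [] (fun l => l ++ [f])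
      else if PySem.Str.startswith f "tests/" then groups.modify "tests" [] (fun l => l ++ [f])
      else if !(PySem.Str.startswith f ".") then groups.modify "other" [] (fun l => l ++ [f])
      else groups) init
  groups.items

-- ===== PORT B =====
-- _CATEGORIES table of (prefix, key); _category = first match, None for dotfiles, else "other"
def pvCategories : List (String × String) := [("docs/", "docs"), ("src/", "src"), ("tests/", "tests")]

def pvCategoryLoop (f : String) : List (String × String) → Option String
  | [] => if PySem.Str.startswith f "." then none else some "other"
  | (pfx, key) :: rest => if PySem.Str.startswith f pfx then some key else pvCategoryLoop f rest

def pvCategory (f : String) : Option String := pvCategoryLoop f pvCategories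

-- dict comprehension: for each key an independent filter-then-sort pass over the raw input
def group_files_py_alt (files : List String) : List (String × List String) :=
  ["docs", "src", "tests", "other"].map (fun key =>
    (key, PySem.List.sorted (files.filter (fun f => pvCategory f == some key)) (fun x => x) false))

-- ===== PRECONDITION & SPEC =====
def Spec_group_files_py (files : List String) (out : List (String × List String)) : Prop := out = group_files_py_alt files
instance (files : List String) (out : List (String × List String)) : Decidable (Spec_group_files_py files out) := by unfold Spec_group_files_py; infer_instance

-- ===== CLAIM (what is proved, stated in full; the proofs are below) =====
def Claim_equal_group_files_py : Prop := ∀ (files : List String), Dom_group_files_py files → Spec_group_files_py files (group_files_py files)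

-- ===== LEMMAS AND PROOFS =====

-- the four (mutually exclusive) branch predicates of A's elif chain
def pvQ1 (f : String) : Bool := PySem.Str.startswith f "docs/"
def pvQ2 (f : String) : Bool := !pvQ1 f && PySem.Str.startswith f "src/"
def pvQ3 (f : String) : Bool := !pvQ1 f && !pvQ2 f && PySem.Str.startswith f "tests/"
def pvQ4 (f : String) : Bool := !pvQ1 f && !pvQ2 f && !pvQ3 f && !(PySem.Str.startswith f ".")

-- B's classifier agrees with A's elif chain, branch by branch
theorem pvCat1 (f : String) : (pvCategory f == some "docs") = pvQ1 f := by
  by_cases h1 : PySem.Str.startswith f "docs/" <;>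
  by_cases h2 : PySem.Str.startswith f "src/" <;>
  by_cases h3 : PySem.Str.startswith f "tests/" <;>
  by_cases h4 : PySem.Str.startswith f "." <;>
  simp_all [pvCategory, pvCategories, pvCategoryLoop, pvQ1]

theorem pvCat2 (f : String) : (pvCategory f == some "src") = pvQ2 f := by
  by_cases h1 : PySem.Str.startswith f "docs/" <;>
  by_cases h2 : PySem.Str.startswith f "src/" <;>
  by_cases h3 : PySem.Str.startswith f "tests/" <;>
  by_cases h4 : PySem.Str.startswith f "." <;>
  simp_all [pvCategory, pvCategories, pvCategoryLoop, pvQ1, pvQ2]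

theorem pvCat3 (f : String) : (pvCategory f == some "tests") = pvQ3 f := by
  by_cases h1 : PySem.Str.startswith f "docs/" <;>
  by_cases h2 : PySem.Str.startswith f "src/" <;>
  by_cases h3 : PySem.Str.startswith f "tests/" <;>
  by_cases h4 : PySem.Str.startswith f "." <;>
  simp_all [pvCategory, pvCategories, pvCategoryLoop, pvQ1, pvQ2, pvQ3]

theorem pvCat4 (f : String) : (pvCategory f == some "other") = pvQ4 f := by
  by_cases h1 : PySem.Str.startswith f "docs/" <;>
  by_cases h2 : PySem.Str.startswith f "src/" <;>
  by_cases h3 : PySem.Str.startswith f "tests/" <;>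
  by_cases h4 : PySem.Str.startswith f "." <;>
  simp_all [pvCategory, pvCategories, pvCategoryLoop, pvQ1, pvQ2, pvQ3, pvQ4]

-- A's loop keeps the four buckets: the final dict is the initial one with each bucket extended by its filter
theorem pvFoldA (l : List String) (d s t o : List String) :
    l.foldl (fun groups f =>
      if PySem.Str.startswith f "docs/" then groups.modify "docs" [] (fun l => l ++ [f])
      else if PySem.Str.startswith f "src/" then groups.modify "src" [] (fun l => l ++ [f])
      else if PySem.Str.startswith f "tests/" then groups.modify "tests" [] (fun l => l ++ [f])
      else if !(PySem.Str.startswith f ".") then groups.modify "other" [] (fun l => l ++ [f])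
      else groups)
      (PySem.Dict.mk [("docs", d), ("src", s), ("tests", t), ("other", o)])
    = PySem.Dict.mk [("docs", d ++ l.filter pvQ1), ("src", s ++ l.filter pvQ2),
                     ("tests", t ++ l.filter pvQ3), ("other", o ++ l.filter pvQ4)] := by
  induction l generalizing d s t o with
  | nil => simp
  | cons f l ih =>
    rw [List.foldl_cons]
    by_cases h1 : PySem.Str.startswith f "docs/"
    all_goals by_cases h2 : PySem.Str.startswith f "src/"
    all_goals by_cases h3 : PySem.Str.startswith f "tests/"
    all_goals by_cases h4 : PySem.Str.startswith f "."
    all_goals simp at h1 h2 h3 h4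
    all_goals conv_lhs =>
      rw [show (if PySem.Str.startswith f "docs/" then
            (PySem.Dict.mk [("docs", d), ("src", s), ("tests", t), ("other", o)]).modify "docs" [] (fun l => l ++ [f])
          else if PySem.Str.startswith f "src/" then
            (PySem.Dict.mk [("docs", d), ("src", s), ("tests", t), ("other", o)]).modify "src" [] (fun l => l ++ [f])
          else if PySem.Str.startswith f "tests/" then
            (PySem.Dict.mk [("docs", d), ("src", s), ("tests", t), ("other", o)]).modify "tests" [] (fun l => l ++ [f])
          else if !(PySem.Str.startswith f ".") then
            (PySem.Dict.mk [("docs", d), ("src", s), ("tests", t), ("other", o)]).modify "other" [] (fun l => l ++ [f])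
          else (PySem.Dict.mk [("docs", d), ("src", s), ("tests", t), ("other", o)]))
        = PySem.Dict.mk [("docs", if pvQ1 f then d ++ [f] else d), ("src", if pvQ2 f then s ++ [f] else s),
            ("tests", if pvQ3 f then t ++ [f] else t), ("other", if pvQ4 f then o ++ [f] else o)] from by
        simp [h1, h2, h3, h4, pvQ1, pvQ2, pvQ3, pvQ4, PySem.Dict.modify, PySem.Dict.getD,
          PySem.Dict.get?, PySem.Dict.contains, PySem.Dict.insert]]
    all_goals rw [ih]
    all_goals simp [h1, h2, h3, h4, pvQ1, pvQ2, pvQ3, pvQ4]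

-- sorting the filtered list = filtering the stably sorted list
theorem pvSortedFilter (p : String → Bool) (xs : List String) :
    PySem.List.sorted (xs.filter p) (fun x => x) false
    = (PySem.List.sorted xs (fun x => x) false).filter p := by
  apply PySem.List.sorted_id_eq_of_perm_of_pairwise
  · exact (PySem.List.sorted_perm xs (fun x => x) false).filter p
  · exact (PySem.List.sorted_pairwise xs (fun x => x)).filter p

-- ===== VERDICT (by name: the statement is the Claim_ definition above) =====
theorem group_files_py_spec : Claim_equal_group_files_py := by
  intro files _
  show group_files_py files = group_files_py_alt files
  unfold group_files_py group_files_py_alt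
  simp only [show (PySem.Dict.ofList [("docs", ([] : List String)), ("src", []), ("tests", []), ("other", [])])
      = PySem.Dict.mk [("docs", []), ("src", []), ("tests", []), ("other", [])] from rfl]
  simp only [pvFoldA]
  simp only [List.map_cons, List.map_nil]
  simp only [funext pvCat1, funext pvCat2, funext pvCat3, funext pvCat4]
  simp [pvSortedFilter]
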